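-- pv_equiv track=rewrite | github.com/fsgeek/Mallku | src/mallku/consciousness/flow_orchestrator.py | _categorize_activity_patterns
-- ===== SOURCE A (Python) =====
-- def _categorize_activity_patterns(patterns: list[str]) -> str:
--     """Categorize activity patterns"""
--     if any("creation" in p for p in patterns):
--         return "creative_emergence"
--     elif any("collaboration" in p for p in patterns):
--         return "collective_work"
--     elif any("deep" in p for p in patterns):
--         return "focused_consciousness"
--     else:
--         return "general_activity"
-- ===== SOURCE B (Python) =====
-- def _categorize_activity_patterns(patterns: list[str]) -> str:
--     """Categorize activity patterns (single pass with flags)."""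
--     has_collab = False
--     has_deep = False
--     for p in patterns:
--         if "creation" in p:
--             return "creative_emergence"
--         if "collaboration" in p:
--             has_collab = True
--         if "deep" in p:
--             has_deep = True
--     if has_collab:
--         return "collective_work"
--     if has_deep:
--         return "focused_consciousness"
--     return "general_activity"
-- ===== Notes on version B (the rewrite author's own statement) =====
-- stated objective: alternative
-- what changed: Replaces three separate early-exit any() scans over the list with one single pass that returns immediately on a 'creation' match and maintains boolean flags for 'collaboration' and 'deep', deciding by priority after the loop.
import Mathlib
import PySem

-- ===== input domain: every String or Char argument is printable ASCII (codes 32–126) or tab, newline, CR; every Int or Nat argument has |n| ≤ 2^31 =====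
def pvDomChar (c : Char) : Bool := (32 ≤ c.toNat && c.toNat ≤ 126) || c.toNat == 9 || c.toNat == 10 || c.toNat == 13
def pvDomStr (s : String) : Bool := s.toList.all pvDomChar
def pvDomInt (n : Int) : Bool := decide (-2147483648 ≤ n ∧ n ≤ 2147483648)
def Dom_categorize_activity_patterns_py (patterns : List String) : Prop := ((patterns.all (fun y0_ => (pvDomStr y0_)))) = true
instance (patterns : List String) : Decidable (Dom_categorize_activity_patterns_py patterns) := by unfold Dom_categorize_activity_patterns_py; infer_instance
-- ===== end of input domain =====

-- ===== PORT A =====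
-- A: three early-exit any() scans in priority order.
def categorize_activity_patterns_py (patterns : List String) : String :=
  if patterns.any (fun p => PySem.Str.isIn "creation" p) then "creative_emergence"
  else if patterns.any (fun p => PySem.Str.isIn "collaboration" p) then "collective_work"
  else if patterns.any (fun p => PySem.Str.isIn "deep" p) then "focused_consciousness"
  else "general_activity"

-- ===== PORT B =====
-- B: one pass over the list; returns at once on "creation", keeps flags for the rest.
def altLoop : List String → Bool → Bool → String
  | [], hasCollab, hasDeep =>
      if hasCollab then "collective_work"
      else if hasDeep then "focused_consciousness"
      else "general_activity"
  | p :: rest, hasCollab, hasDeep =>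
      if PySem.Str.isIn "creation" p then "creative_emergence"
      else altLoop rest (hasCollab || PySem.Str.isIn "collaboration" p)
                        (hasDeep || PySem.Str.isIn "deep" p)

def categorize_activity_patterns_py_alt (patterns : List String) : String :=
  altLoop patterns false false

-- ===== PRECONDITION & SPEC =====
def Spec_categorize_activity_patterns_py (patterns : List String) (out : String) : Prop := out = categorize_activity_patterns_py_alt patterns
instance (patterns : List String) (out : String) : Decidable (Spec_categorize_activity_patterns_py patterns out) := by unfold Spec_categorize_activity_patterns_py; infer_instance

-- ===== CLAIM (what is proved, stated in full; the proofs are below) =====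
def Claim_equal_categorize_activity_patterns_py : Prop := ∀ (patterns : List String), Dom_categorize_activity_patterns_py patterns → Spec_categorize_activity_patterns_py patterns (categorize_activity_patterns_py patterns)

-- ===== LEMMAS AND PROOFS =====

-- ===== VERDICT (by name: the statement is the Claim_ definition above) =====
lemma altLoop_eq (xs : List String) (c d : Bool) :
    altLoop xs c d =
      if xs.any (fun p => PySem.Str.isIn "creation" p) then "creative_emergence"
      else if c || xs.any (fun p => PySem.Str.isIn "collaboration" p) then "collective_work"
      else if d || xs.any (fun p => PySem.Str.isIn "deep" p) then "focused_consciousness"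
      else "general_activity" := by
  induction xs generalizing c d with
  | nil => simp [altLoop]
  | cons p rest ih =>
      simp only [altLoop, List.any_cons]
      by_cases h : PySem.Str.isIn "creation" p
      · rw [if_pos h, if_pos (by simp only [h, Bool.true_or])]
      · rw [if_neg h, ih]
        simp only [h, Bool.false_or, Bool.or_assoc]
        rfl

theorem categorize_activity_patterns_py_spec : Claim_equal_categorize_activity_patterns_py := by
  intro patterns _
  unfold Spec_categorize_activity_patterns_py categorize_activity_patterns_py categorize_activity_patterns_py_alt
  rw [altLoop_eq]
  simp
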